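-- pv_equiv track=rewrite | github.com/Ryz3nPlayZ/researchstaging | backend/database/credit_models.py | get_optimal_provider
-- ===== SOURCE A (Python) =====
-- AUTO_PROVIDER_ORDER = [
--     "gemini",      # Best value (fast, cheap)
--     "groq",        # Good value (very fast, cheap)
--     "openai",      # Best quality (expensive but excellent)
--     "mistral",     # Good quality mid-range
--     "openrouter",  # Fallback
-- ]
--
-- def get_optimal_provider(
--     required_quality: str = "standard",
--     available_providers: list = None
-- ) -> tuple[str, str]:
--     """
--     Get the optimal provider for cost-effectiveness.
--
--     Args:
--         required_quality: "fast" (speed), "standard" (balanced), "high" (quality)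
--         available_providers: List of available providers
--
--     Returns:
--         (provider, model) tuple
--     """
--     if available_providers is None:
--         available_providers = AUTO_PROVIDER_ORDER
--
--     if required_quality == "fast":
--         # Prioritize speed (Groq, Gemini Flash)
--         for provider in ["groq", "gemini", "openai"]:
--             if provider in available_providers:
--                 if provider == "groq":
--                     return provider, "llama-3.3-70b"
--                 elif provider == "gemini":
--                     return provider, "gemini-2.5-flash"
--                 elif provider == "openai":
--                     return provider, "gpt-4.1-mini"
--
--     elif required_quality == "high":
--         # Prioritize quality (OpenAI GPT-4o, Mistral Large)
--         for provider in ["openai", "mistral", "gemini"]: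
--             if provider in available_providers:
--                 if provider == "openai":
--                     return provider, "gpt-4o"
--                 elif provider == "mistral":
--                     return provider, "mistral-large-3"
--                 elif provider == "gemini":
--                     return provider, "gemini-2.5-flash"
--
--     else:  # standard
--         # Balanced cost/quality
--         for provider in available_providers:
--             if provider == "gemini":
--                 return provider, "gemini-2.5-flash"
--             elif provider == "groq":
--                 return provider, "llama-3.3-70b"
--             elif provider == "openai":
--                 return provider, "gpt-4.1-mini"
--
--     # Fallback
--     return available_providers[0] if available_providers else "openai", "gpt-4.1-mini"
-- ===== SOURCE B (Python) =====
-- AUTO_PROVIDER_ORDER = [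
--     "gemini",
--     "groq",
--     "openai",
--     "mistral",
--     "openrouter",
-- ]
--
-- # Per-quality ranking table: provider -> (rank, model); lower rank = more preferred.
-- RANK_TABLE = {
--     "fast": {"groq": (0, "llama-3.3-70b"),
--              "gemini": (1, "gemini-2.5-flash"),
--              "openai": (2, "gpt-4.1-mini")},
--     "high": {"openai": (0, "gpt-4o"),
--              "mistral": (1, "mistral-large-3"),
--              "gemini": (2, "gemini-2.5-flash")},
-- }
-- STANDARD_MODELS = {"gemini": "gemini-2.5-flash",
--                    "groq": "llama-3.3-70b",
--                    "openai": "gpt-4.1-mini"}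
--
--
-- def get_optimal_provider(
--     required_quality: str = "standard",
--     available_providers: list = None
-- ) -> tuple[str, str]:
--     if available_providers is None:
--         available_providers = AUTO_PROVIDER_ORDER
--     tab = RANK_TABLE.get(required_quality)
--     # Single argmin pass over the AVAILABLE providers: score each one (in
--     # standard mode a provider's score is its position, so the first usable
--     # one wins) and keep the best-scored, first occurrence winning ties.
--     best = None  # (rank, provider, model)
--     for pos, p in enumerate(available_providers):
--         e = tab.get(p) if tab is not None else (
--             (pos, STANDARD_MODELS[p]) if p in STANDARD_MODELS else None)
--         if e is not None and (best is None or e[0] < best[0]):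
--             best = (e[0], p, e[1])
--     if best is not None:
--         return best[1], best[2]
--     return (available_providers[0] if available_providers else "openai"), "gpt-4.1-mini"
-- ===== Notes on version B (the rewrite author's own statement) =====
-- stated objective: alternative
-- what changed: Inverts the traversal: instead of walking a mode-specific preference list and testing membership in available_providers, B makes a single argmin pass over available_providers itself, scoring each provider by a per-quality rank table (position in standard mode) and keeping the best-ranked first occurrence.
import Mathlib
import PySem

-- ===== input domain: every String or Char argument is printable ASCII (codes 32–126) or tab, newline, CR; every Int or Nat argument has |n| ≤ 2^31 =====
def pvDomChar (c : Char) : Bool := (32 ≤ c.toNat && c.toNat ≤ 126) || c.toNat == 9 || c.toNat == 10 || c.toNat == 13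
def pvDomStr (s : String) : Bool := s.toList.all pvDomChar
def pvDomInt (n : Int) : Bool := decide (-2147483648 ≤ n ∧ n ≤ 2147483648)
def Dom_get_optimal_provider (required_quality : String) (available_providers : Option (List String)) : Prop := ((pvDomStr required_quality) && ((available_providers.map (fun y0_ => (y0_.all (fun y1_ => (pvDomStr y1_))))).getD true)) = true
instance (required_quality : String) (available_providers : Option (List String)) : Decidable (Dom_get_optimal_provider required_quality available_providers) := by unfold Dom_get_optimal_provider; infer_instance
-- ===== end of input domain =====

-- One honest line: B inverts the traversal — a single argmin pass over available_providers
-- scored by a per-quality rank table, instead of A's walk over a preference list testing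
-- membership (objective: alternative, same cost).

-- ===== PORT A =====
def pvAutoOrder : List String := ["gemini", "groq", "openai", "mistral", "openrouter"]

-- A's "fast" for-loop: return on match, otherwise continue
def pvAFast : List String → List String → Option (String × String)
  | [], _ => none
  | p :: rest, avail =>
    if avail.contains p then
      if p == "groq" then some (p, "llama-3.3-70b")
      else if p == "gemini" then some (p, "gemini-2.5-flash")
      else if p == "openai" then some (p, "gpt-4.1-mini")
      else pvAFast rest avail
    else pvAFast rest avail

-- A's "high" for-loop
def pvAHigh : List String → List String → Option (String × String)
  | [], _ => none
  | p :: rest, avail =>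
    if avail.contains p then
      if p == "openai" then some (p, "gpt-4o")
      else if p == "mistral" then some (p, "mistral-large-3")
      else if p == "gemini" then some (p, "gemini-2.5-flash")
      else pvAHigh rest avail
    else pvAHigh rest avail

-- A's "standard" for-loop over available_providers
def pvAStd : List String → Option (String × String)
  | [] => none
  | p :: rest =>
    if p == "gemini" then some (p, "gemini-2.5-flash")
    else if p == "groq" then some (p, "llama-3.3-70b")
    else if p == "openai" then some (p, "gpt-4.1-mini")
    else pvAStd rest

def get_optimal_provider (required_quality : String) (available_providers : Option (List String)) : String × String :=
  let avail := available_providers.getD pvAutoOrder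
  let r :=
    if required_quality == "fast" then pvAFast ["groq", "gemini", "openai"] avail
    else if required_quality == "high" then pvAHigh ["openai", "mistral", "gemini"] avail
    else pvAStd avail
  match r with
  | some x => x
  | none => (match avail with | [] => "openai" | x :: _ => x, "gpt-4.1-mini")

-- ===== PORT B =====
-- RANK_TABLE values: provider -> (rank, model)
def pvTabFast : PySem.Dict String (Int × String) :=
  PySem.Dict.ofList [("groq", (0, "llama-3.3-70b")), ("gemini", (1, "gemini-2.5-flash")), ("openai", (2, "gpt-4.1-mini"))]
def pvTabHigh : PySem.Dict String (Int × String) :=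
  PySem.Dict.ofList [("openai", (0, "gpt-4o")), ("mistral", (1, "mistral-large-3")), ("gemini", (2, "gemini-2.5-flash"))]
def pvRankTable : PySem.Dict String (PySem.Dict String (Int × String)) :=
  PySem.Dict.ofList [("fast", pvTabFast), ("high", pvTabHigh)]
def pvStdModels : PySem.Dict String String :=
  PySem.Dict.ofList [("gemini", "gemini-2.5-flash"), ("groq", "llama-3.3-70b"), ("openai", "gpt-4.1-mini")]

-- B's single loop `for pos, p in enumerate(available_providers)` with the
-- running best (rank, provider, model); pos carried as an explicit index.
def pvBScan : List String → Nat → Option (PySem.Dict String (Int × String)) →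
    Option (Int × String × String) → Option (Int × String × String)
  | [], _, _, best => best
  | p :: rest, pos, tab, best =>
    let e : Option (Int × String) :=
      match tab with
      | some t => t.get? p
      | none =>
        match pvStdModels.get? p with      -- `(pos, STANDARD_MODELS[p]) if p in STANDARD_MODELS else None`
        | some m => some ((pos : Int), m)
        | none => none
    let best' :=
      match e with
      | none => best
      | some (k, m) =>
        match best with
        | none => some (k, p, m)
        | some b => if k < b.1 then some (k, p, m) else some b
    pvBScan rest (pos + 1) tab best'

def get_optimal_provider_alt (required_quality : String) (available_providers : Option (List String)) : String × String :=
  let avail := available_providers.getD pvAutoOrder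
  let tab := pvRankTable.get? required_quality
  match pvBScan avail 0 tab none with
  | some (_, p, m) => (p, m)
  | none => (match avail with | [] => "openai" | x :: _ => x, "gpt-4.1-mini")

-- ===== PRECONDITION & SPEC =====
def Spec_get_optimal_provider (required_quality : String) (available_providers : Option (List String)) (out : String × String) : Prop := out = get_optimal_provider_alt required_quality available_providers
instance (required_quality : String) (available_providers : Option (List String)) (out : String × String) : Decidable (Spec_get_optimal_provider required_quality available_providers out) := by unfold Spec_get_optimal_provider; infer_instance

-- ===== CLAIM =====
def Claim_equal_get_optimal_provider : Prop := ∀ (required_quality : String) (available_providers : Option (List String)), Dom_get_optimal_provider required_quality available_providers → Spec_get_optimal_provider required_quality available_providers (get_optimal_provider required_quality available_providers)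

-- ===== LEMMAS AND PROOFS =====

-- merge of two running bests: strict-min, left (earlier) wins ties
def pvMrg : Option (Int × String × String) → Option (Int × String × String) → Option (Int × String × String)
  | none, b => b
  | some a, none => some a
  | some a, some b => if b.1 < a.1 then some b else some a

theorem pvMrg_assoc (a b c : Option (Int × String × String)) :
    pvMrg (pvMrg a b) c = pvMrg a (pvMrg b c) := by
  rcases a with _ | a <;> rcases b with _ | b <;> rcases c with _ | c <;> simp only [pvMrg] <;>
    split_ifs <;> (try simp only [pvMrg]) <;> (try split_ifs) <;> first | rfl | omega

-- the scan from accumulator `acc` is the merge of `acc` with the scan from none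
theorem pvBScan_merge (l : List String) (i : Nat) (tab : Option (PySem.Dict String (Int × String)))
    (acc : Option (Int × String × String)) :
    pvBScan l i tab acc = pvMrg acc (pvBScan l i tab none) := by
  induction l generalizing i acc with
  | nil => cases acc <;> rfl
  | cons p rest ih =>
    have hstep : ∀ (a : Option (Int × String × String)),
        pvBScan (p :: rest) i tab a =
          pvBScan rest (i + 1) tab
            (pvMrg a (match (match tab with
              | some t => t.get? p
              | none => match pvStdModels.get? p with
                | some m => some ((i : Int), m)
                | none => none) with
              | none => none
              | some (k, m) => some (k, p, m))) := by
      intro a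
      show pvBScan rest (i + 1) tab _ = _
      congr 1
      generalize (match tab with
        | some t => t.get? p
        | none => match pvStdModels.get? p with
          | some m => some ((i : Int), m)
          | none => none) = e
      rcases e with _ | ⟨k, m⟩ <;> rcases a with _ | a <;> simp [pvMrg]
    have hnone : ∀ x : Option (Int × String × String), pvMrg none x = x := fun _ => rfl
    rw [hstep acc, hstep none, hnone]
    generalize (match (match tab with
      | some t => t.get? p
      | none => match pvStdModels.get? p with
        | some m => some ((i : Int), m)
        | none => none) with
      | none => (none : Option (Int × String × String))
      | some (k, m) => some (k, p, m)) = E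
    rw [ih (i + 1) (pvMrg acc E), ih (i + 1) E, pvMrg_assoc]

-- spec of the fast-mode argmin
def pvFastSpec (avail : List String) : Option (Int × String × String) :=
  if avail.contains "groq" then some (0, "groq", "llama-3.3-70b")
  else if avail.contains "gemini" then some (1, "gemini", "gemini-2.5-flash")
  else if avail.contains "openai" then some (2, "openai", "gpt-4.1-mini")
  else none

def pvHighSpec (avail : List String) : Option (Int × String × String) :=
  if avail.contains "openai" then some (0, "openai", "gpt-4o")
  else if avail.contains "mistral" then some (1, "mistral", "mistral-large-3")
  else if avail.contains "gemini" then some (2, "gemini", "gemini-2.5-flash")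
  else none

theorem pvBScan_fast (avail : List String) (i : Nat) :
    pvBScan avail i (some pvTabFast) none = pvFastSpec avail := by
  induction avail generalizing i with
  | nil => rfl
  | cons p rest ih =>
    show pvBScan rest (i+1) (some pvTabFast) _ = _
    rw [pvBScan_merge]
    rw [ih (i+1)]
    by_cases h1 : p = "groq"
    · subst h1
      have : pvTabFast.get? "groq" = some (0, "llama-3.3-70b") := by decide
      simp only [this]
      simp only [pvFastSpec, List.contains_cons]
      split_ifs <;> simp_all [pvMrg]
    · by_cases h2 : p = "gemini"
      · subst h2
        have : pvTabFast.get? "gemini" = some (1, "gemini-2.5-flash") := by decide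
        simp only [this]
        simp only [pvFastSpec, List.contains_cons]
        split_ifs <;> simp_all [pvMrg]
      · by_cases h3 : p = "openai"
        · subst h3
          have : pvTabFast.get? "openai" = some (2, "gpt-4.1-mini") := by decide
          simp only [this]
          simp only [pvFastSpec, List.contains_cons]
          split_ifs <;> simp_all [pvMrg]
        · have : pvTabFast.get? p = none := by
            rw [PySem.Dict.get?_eq_none_iff_not_mem_keys,
              show pvTabFast.keys = ["groq", "gemini", "openai"] from by decide]
            simp [h1, h2, h3]
          simp only [this]
          simp only [pvFastSpec, List.contains_cons, pvMrg]
          have e1 : ("groq" == p) = false := by simp [Ne.symm h1]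
          have e2 : ("gemini" == p) = false := by simp [Ne.symm h2]
          have e3 : ("openai" == p) = false := by simp [Ne.symm h3]
          simp [e1, e2, e3]

theorem pvBScan_high (avail : List String) (i : Nat) :
    pvBScan avail i (some pvTabHigh) none = pvHighSpec avail := by
  induction avail generalizing i with
  | nil => rfl
  | cons p rest ih =>
    show pvBScan rest (i+1) (some pvTabHigh) _ = _
    rw [pvBScan_merge]
    rw [ih (i+1)]
    by_cases h1 : p = "openai"
    · subst h1
      have : pvTabHigh.get? "openai" = some (0, "gpt-4o") := by decide
      simp only [this]
      simp only [pvHighSpec, List.contains_cons]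
      split_ifs <;> simp_all [pvMrg]
    · by_cases h2 : p = "mistral"
      · subst h2
        have : pvTabHigh.get? "mistral" = some (1, "mistral-large-3") := by decide
        simp only [this]
        simp only [pvHighSpec, List.contains_cons]
        split_ifs <;> simp_all [pvMrg]
      · by_cases h3 : p = "gemini"
        · subst h3
          have : pvTabHigh.get? "gemini" = some (2, "gemini-2.5-flash") := by decide
          simp only [this]
          simp only [pvHighSpec, List.contains_cons]
          split_ifs <;> simp_all [pvMrg]
        · have : pvTabHigh.get? p = none := by
            rw [PySem.Dict.get?_eq_none_iff_not_mem_keys,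
              show pvTabHigh.keys = ["openai", "mistral", "gemini"] from by decide]
            simp [h1, h2, h3]
          simp only [this]
          simp only [pvHighSpec, List.contains_cons, pvMrg]
          have e1 : ("openai" == p) = false := by simp [Ne.symm h1]
          have e2 : ("mistral" == p) = false := by simp [Ne.symm h2]
          have e3 : ("gemini" == p) = false := by simp [Ne.symm h3]
          simp [e1, e2, e3]

-- A's loop over its fixed fast candidate list, as a containment chain
theorem pvAFast_eq (avail : List String) :
    pvAFast ["groq", "gemini", "openai"] avail =
      (pvFastSpec avail).map (fun b => (b.2.1, b.2.2)) := by
  show (if avail.contains "groq" then some ("groq", "llama-3.3-70b")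
    else if avail.contains "gemini" then some ("gemini", "gemini-2.5-flash")
    else if avail.contains "openai" then some ("openai", "gpt-4.1-mini")
    else none) = _
  unfold pvFastSpec
  split_ifs <;> rfl

theorem pvAHigh_eq (avail : List String) :
    pvAHigh ["openai", "mistral", "gemini"] avail =
      (pvHighSpec avail).map (fun b => (b.2.1, b.2.2)) := by
  show (if avail.contains "openai" then some ("openai", "gpt-4o")
    else if avail.contains "mistral" then some ("mistral", "mistral-large-3")
    else if avail.contains "gemini" then some ("gemini", "gemini-2.5-flash")
    else none) = _
  unfold pvHighSpec
  split_ifs <;> rfl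

-- standard mode: the scan's result projects to A's first-match loop, and its key ≥ i
theorem pvBScan_std (avail : List String) (i : Nat) :
    (pvBScan avail i none none = none ∧ pvAStd avail = none) ∨
    ∃ k p m, (i : Int) ≤ k ∧ pvBScan avail i none none = some (k, p, m) ∧ pvAStd avail = some (p, m) := by
  induction avail generalizing i with
  | nil => left; exact ⟨rfl, rfl⟩
  | cons p rest ih =>
    by_cases h1 : p = "gemini"
    · subst h1
      right
      refine ⟨(i : Int), "gemini", "gemini-2.5-flash", le_refl _, ?_, by simp [pvAStd]⟩
      show pvBScan rest (i+1) none _ = _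
      have hg : pvStdModels.get? "gemini" = some "gemini-2.5-flash" := by decide
      simp only [hg]
      rw [pvBScan_merge]
      rcases ih (i+1) with ⟨hb, _⟩ | ⟨k, q, m, hk, hb, _⟩
      · simp [hb, pvMrg]
      · rw [hb]; simp only [pvMrg]
        have : ¬ k < (i : Int) := by push_cast at hk ⊢; omega
        simp [this]
    · by_cases h2 : p = "groq"
      · subst h2
        right
        refine ⟨(i : Int), "groq", "llama-3.3-70b", le_refl _, ?_, by simp [pvAStd]⟩
        show pvBScan rest (i+1) none _ = _
        have hg : pvStdModels.get? "groq" = some "llama-3.3-70b" := by decide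
        simp only [hg]
        rw [pvBScan_merge]
        rcases ih (i+1) with ⟨hb, _⟩ | ⟨k, q, m, hk, hb, _⟩
        · simp [hb, pvMrg]
        · rw [hb]; simp only [pvMrg]
          have : ¬ k < (i : Int) := by push_cast at hk ⊢; omega
          simp [this]
      · by_cases h3 : p = "openai"
        · subst h3
          right
          refine ⟨(i : Int), "openai", "gpt-4.1-mini", le_refl _, ?_, by simp [pvAStd]⟩
          show pvBScan rest (i+1) none _ = _
          have hg : pvStdModels.get? "openai" = some "gpt-4.1-mini" := by decide
          simp only [hg]
          rw [pvBScan_merge]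
          rcases ih (i+1) with ⟨hb, _⟩ | ⟨k, q, m, hk, hb, _⟩
          · simp [hb, pvMrg]
          · rw [hb]; simp only [pvMrg]
            have : ¬ k < (i : Int) := by push_cast at hk ⊢; omega
            simp [this]
        · have hn : pvStdModels.get? p = none := by
            rw [PySem.Dict.get?_eq_none_iff_not_mem_keys,
              show pvStdModels.keys = ["gemini", "groq", "openai"] from by decide]
            simp [h1, h2, h3]
          have hstep : pvBScan (p :: rest) i none none = pvBScan rest (i+1) none none := by
            show pvBScan rest (i+1) none _ = _
            simp [hn]
          have hstd : pvAStd (p :: rest) = pvAStd rest := by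
            simp [pvAStd, h1, h2, h3]
          rw [hstep, hstd]
          rcases ih (i+1) with ⟨hb, ha⟩ | ⟨k, q, m, hk, hb, ha⟩
          · exact Or.inl ⟨hb, ha⟩
          · exact Or.inr ⟨k, q, m, by push_cast at hk ⊢; omega, hb, ha⟩

theorem pvRankTable_none {q : String} (h1 : q ≠ "fast") (h2 : q ≠ "high") :
    pvRankTable.get? q = none := by
  rw [PySem.Dict.get?_eq_none_iff_not_mem_keys,
    show pvRankTable.keys = ["fast", "high"] from by decide]
  simp [h1, h2]

-- ===== VERDICT =====
theorem get_optimal_provider_spec : Claim_equal_get_optimal_provider := by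
  intro q ap _
  unfold Spec_get_optimal_provider get_optimal_provider get_optimal_provider_alt
  set avail := ap.getD pvAutoOrder with havail
  by_cases hf : q = "fast"
  · subst hf
    have ht : pvRankTable.get? "fast" = some pvTabFast := by decide
    simp only [ht, pvBScan_fast, beq_self_eq_true, if_true, pvAFast_eq]
    rcases hspec : pvFastSpec avail with _ | ⟨k, p, m⟩ <;> simp
  · by_cases hh : q = "high"
    · subst hh
      have ht : pvRankTable.get? "high" = some pvTabHigh := by decide
      simp only [ht, pvBScan_high, show ("high" == "fast") = false from rfl,
        Bool.false_eq_true, if_false, beq_self_eq_true, if_true, pvAHigh_eq]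
      rcases hspec : pvHighSpec avail with _ | ⟨k, p, m⟩ <;> simp
    · have hfb : (q == "fast") = false := by simp [hf]
      have hhb : (q == "high") = false := by simp [hh]
      simp only [pvRankTable_none hf hh, hfb, hhb, Bool.false_eq_true, if_false]
      rcases pvBScan_std avail 0 with ⟨hb, ha⟩ | ⟨k, p, m, _, hb, ha⟩
      · simp [hb, ha]
      · simp [hb, ha]
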